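-- pv_equiv track=rewrite | github.com/WilliamLeite93/ALGORITMOS-ESTRUTURAS-DE-DADOS-II | Aula03/solucao.py | gerar_condicoes
-- ===== SOURCE A (Python) =====
-- def gerar_condicoes(condicoes: list[str]) -> list[dict]:
--     casos = [{}]
--
--     for condicao in condicoes:
--         novos_casos = []
--         for caso in casos:
--
--             novos_casos.append({**caso, condicao: True}) # spread operator para manter as chaves e valores do dicionário 'caso' e adicionar a nova chave 'condicao' com o valor True
--
--             novos_casos.append({**caso, condicao: False})
--         casos = novos_casos
--     return casos
-- ===== SOURCE B (Python) =====
-- from itertools import product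
--
-- def gerar_condicoes(condicoes: list[str]) -> list[dict]:
--     return [dict(zip(condicoes, combo))
--             for combo in product([True, False], repeat=len(condicoes))]
-- ===== Notes on version B (the rewrite author's own statement) =====
-- stated objective: idiomatic
-- what changed: Replaces the incremental list-doubling loop over partial dicts with a single itertools.product([True, False], repeat=n) pass that builds each dict once via dict(zip(...)).
import Mathlib
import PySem

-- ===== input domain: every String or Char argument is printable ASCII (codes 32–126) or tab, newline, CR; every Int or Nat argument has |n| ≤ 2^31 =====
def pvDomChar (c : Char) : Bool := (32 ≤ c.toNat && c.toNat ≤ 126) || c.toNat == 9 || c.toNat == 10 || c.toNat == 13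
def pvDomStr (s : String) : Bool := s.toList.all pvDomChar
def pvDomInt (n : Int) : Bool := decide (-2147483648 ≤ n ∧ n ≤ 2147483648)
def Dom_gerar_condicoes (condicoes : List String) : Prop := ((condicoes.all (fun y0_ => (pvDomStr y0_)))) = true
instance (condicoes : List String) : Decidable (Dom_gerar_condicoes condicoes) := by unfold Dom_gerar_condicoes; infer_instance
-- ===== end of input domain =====

-- B replaces A's incremental list-doubling loop with one product-of-[true,false]-then-zip pass (idiomatic, same cost).

-- dict insert with Python semantics: overwrite keeps the key's position, new keys append
-- (shared dict primitive for both ports; exact for '{**d, k: v}' and for dict(zip(...)) built pair by pair)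
def pvIns : List (String × Bool) → String → Bool → List (String × Bool)
  | [], k, v => [(k, v)]
  | (k', v') :: rest, k, v =>
      if k' == k then (k', v) :: rest else (k', v') :: pvIns rest k v

-- ===== PORT A =====
def gerar_condicoes (condicoes : List String) : List (List (String × Bool)) :=
  condicoes.foldl
    (fun casos condicao =>
      casos.foldl
        (fun novos_casos caso =>
          (novos_casos ++ [pvIns caso condicao true]) ++ [pvIns caso condicao false])
        [])
    [[]]

-- ===== PORT B =====
-- itertools.product([True, False], repeat=n): first coordinate varies slowest
def pvProduct : Nat → List (List Bool)
  | 0 => [[]]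
  | n + 1 => [true, false].flatMap (fun b => (pvProduct n).map (fun bs => b :: bs))

def gerar_condicoes_alt (condicoes : List String) : List (List (String × Bool)) :=
  (pvProduct condicoes.length).map
    (fun combo => (condicoes.zip combo).foldl (fun d p => pvIns d p.1 p.2) [])

-- ===== PRECONDITION & SPEC =====
def Spec_gerar_condicoes (condicoes : List String) (out : List (List (String × Bool))) : Prop := out = gerar_condicoes_alt condicoes
instance (condicoes : List String) (out : List (List (String × Bool))) : Decidable (Spec_gerar_condicoes condicoes out) := by unfold Spec_gerar_condicoes; infer_instance

-- ===== CLAIM (what is proved, stated in full; the proofs are below) =====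
def Claim_equal_gerar_condicoes : Prop := ∀ (condicoes : List String), Dom_gerar_condicoes condicoes → Spec_gerar_condicoes condicoes (gerar_condicoes condicoes)

-- ===== LEMMAS AND PROOFS =====

theorem flatten_pairs {α β : Type} (l : List α) (g h : α → List β) :
    (l.map (fun x => [g x, h x])).flatten.flatten = (l.map (fun x => g x ++ h x)).flatten := by
  induction l with
  | nil => simp
  | cons a t ih => simp [ih]

-- the inner loop of A appends two dicts per caso: it is a flatMap
theorem innerA (casos : List (List (String × Bool))) (c : String) :
    casos.foldl
      (fun novos_casos caso =>
        (novos_casos ++ [pvIns caso c true]) ++ [pvIns caso c false]) []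
    = casos.flatMap (fun caso => [pvIns caso c true, pvIns caso c false]) := by
  have := PySem.List.foldl_append_eq_flatMap
    (l := casos) (acc := ([] : List (List (String × Bool))))
    (g := fun caso => [pvIns caso c true, pvIns caso c false])
  simpa [List.append_assoc] using this

-- A's whole loop, started from an arbitrary list of partial dicts, equals
-- "for each partial dict, extend it by every combination of the remaining conditions"
theorem loopA (cs : List String) (casos : List (List (String × Bool))) :
    cs.foldl
      (fun casos condicao =>
        casos.foldl
          (fun novos_casos caso =>
            (novos_casos ++ [pvIns caso condicao true]) ++ [pvIns caso condicao false])
          [])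
      casos
    = casos.flatMap (fun d =>
        (pvProduct cs.length).map
          (fun bs => (cs.zip bs).foldl (fun d p => pvIns d p.1 p.2) d)) := by
  induction cs generalizing casos with
  | nil => simp [pvProduct]
  | cons c cs ih =>
      rw [List.foldl_cons, innerA, ih]
      simp [pvProduct, List.flatMap_def, List.map_map, Function.comp_def]
      rw [flatten_pairs]

-- ===== VERDICT (by name: the statement is the Claim_ definition above) =====
theorem gerar_condicoes_spec : Claim_equal_gerar_condicoes := by
  intro condicoes _
  unfold Spec_gerar_condicoes gerar_condicoes gerar_condicoes_alt
  rw [loopA]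
  simp
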